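-- pv_equiv track=rewrite | github.com/ctralie/KanyePlaysPokemon | oldTwitterCode.py | getRidOfDisallowedChars
-- ===== SOURCE A (Python) =====
-- def getRidOfDisallowedChars(s):
--     chars = ["@", "#", "\n"]
--     text = ""+s
--     for c in chars:
--         text = text.replace("@", "")
--         text = text.replace("#", "")
--         text = text.replace("\n", "")
--     return text
-- ===== SOURCE B (Python) =====
-- def getRidOfDisallowedChars(s):
--     disallowed = {"@", "#", "\n"}
--     return "".join(ch for ch in s if ch not in disallowed)
-- ===== Notes on version B (the rewrite author's own statement) =====
-- stated objective: idiomatic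
-- what changed: Replaces the redundant triple loop of three full-string .replace scans (nine passes) with a single filtering pass joining the characters not in the disallowed set.
import Mathlib
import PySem

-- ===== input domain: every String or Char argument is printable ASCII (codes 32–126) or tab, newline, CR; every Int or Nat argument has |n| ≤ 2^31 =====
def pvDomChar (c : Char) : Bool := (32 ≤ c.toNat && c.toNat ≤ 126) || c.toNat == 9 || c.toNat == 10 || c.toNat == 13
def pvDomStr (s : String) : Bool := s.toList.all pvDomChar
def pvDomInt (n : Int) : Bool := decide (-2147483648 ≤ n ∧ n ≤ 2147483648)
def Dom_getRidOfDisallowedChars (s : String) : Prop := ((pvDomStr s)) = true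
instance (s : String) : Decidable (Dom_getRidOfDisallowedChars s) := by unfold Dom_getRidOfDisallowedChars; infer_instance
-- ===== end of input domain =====

-- B replaces A's redundant triple loop of full-string replace scans with one filtering pass (idiomatic).


-- ===== PORT A =====
def getRidOfDisallowedChars (s : String) : String :=
  let chars : List String := ["@", "#", "\n"]
  let text : String := "" ++ s
  chars.foldl (fun text _c =>
    let text := PySem.Str.replace text "@" ""
    let text := PySem.Str.replace text "#" ""
    let text := PySem.Str.replace text "\n" ""
    text) text

-- ===== PORT B =====
def getRidOfDisallowedChars_alt (s : String) : String :=
  String.ofList (s.toList.filter (fun ch => !(ch == '@' || ch == '#' || ch == '\n')))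

-- ===== PRECONDITION & SPEC =====
def Spec_getRidOfDisallowedChars (s : String) (out : String) : Prop := out = getRidOfDisallowedChars_alt s
instance (s : String) (out : String) : Decidable (Spec_getRidOfDisallowedChars s out) := by unfold Spec_getRidOfDisallowedChars; infer_instance

-- ===== CLAIM (what is proved, stated in full; the proofs are below) =====
def Claim_equal_getRidOfDisallowedChars : Prop := ∀ (s : String), Dom_getRidOfDisallowedChars s → Spec_getRidOfDisallowedChars s (getRidOfDisallowedChars s)

-- ===== LEMMAS AND PROOFS =====

-- replace's worker with a single-char pattern and empty replacement is a filter
theorem replace_go_single (c : Char) (fuel : Nat) (l acc : List Char) (h : l.length ≤ fuel) :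
    PySem.Chars.replace.go [c] [] fuel l acc = acc.reverse ++ l.filter (fun x => x != c) := by
  induction fuel generalizing l acc with
  | zero =>
    have : l = [] := List.eq_nil_of_length_eq_zero (Nat.le_zero.mp h)
    subst this
    simp [PySem.Chars.replace.go]
  | succ n ih =>
    cases l with
    | nil => simp [PySem.Chars.replace.go]
    | cons a t =>
      simp only [PySem.Chars.replace.go]
      by_cases hac : a = c
      · subst hac
        simp only [List.isPrefixOf, BEq.rfl, Bool.true_and, if_pos, List.length_cons,
          List.drop_succ_cons, List.drop_zero, List.length_nil, List.reverse_nil, List.nil_append]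
        rw [ih t acc (Nat.le_of_succ_le_succ (by simpa using h))]
        simp
      · have hca : ¬ c = a := fun h' => hac h'.symm
        have hp : ([c].isPrefixOf (a :: t)) = false := by
          simp [List.isPrefixOf, hca]
        rw [hp]
        simp only [Bool.false_eq_true, if_false]
        rw [ih t (a :: acc) (Nat.le_of_succ_le_succ (by simpa using h))]
        simp [hac]

theorem replace_single_filter (c : Char) (l : List Char) :
    PySem.Chars.replace l [c] [] = l.filter (fun x => x != c) := by
  rw [PySem.Chars.replace]
  simp only [List.isEmpty_cons, Bool.false_eq_true, if_false]
  simpa using replace_go_single c l.length l [] le_rfl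

theorem replace_toList (t o : String) (c : Char) (ho : o.toList = [c]) :
    (PySem.Str.replace t o "").toList = t.toList.filter (fun x => x != c) := by
  rw [PySem.Str.toList_replace, ho]
  have he : ("" : String).toList = ([] : List Char) := rfl
  rw [he, replace_single_filter]

-- ===== VERDICT (by name: the statement is the Claim_ definition above) =====
theorem getRidOfDisallowedChars_spec : Claim_equal_getRidOfDisallowedChars := by
  intro s _
  unfold Spec_getRidOfDisallowedChars getRidOfDisallowedChars getRidOfDisallowedChars_alt
  simp only [List.foldl]
  apply String.toList_injective
  rw [replace_toList _ _ '\n' rfl, replace_toList _ _ '#' rfl, replace_toList _ _ '@' rfl,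
      replace_toList _ _ '\n' rfl, replace_toList _ _ '#' rfl, replace_toList _ _ '@' rfl,
      replace_toList _ _ '\n' rfl, replace_toList _ _ '#' rfl, replace_toList _ _ '@' rfl]
  simp only [List.filter_filter, String.toList_append, String.toList_empty, List.nil_append, String.toList_ofList]
  refine List.filter_congr (fun a _ => ?_)
  cases hb1 : a == '@' <;> cases hb2 : a == '#' <;> cases hb3 : a == '\n' <;>
    simp [bne, hb1, hb2, hb3]
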